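-- pv_equiv track=rewrite | github.com/ilitzkyd/Stock-Market-Analysis | midterm.py | birthday_count
-- ===== SOURCE A (Python) =====
-- def birthday_count(dates_list):
--     """Total number of birthday pairs in a list by counting each pair only once"""
--     count = 0
--     for people in range(len(dates_list)):
--         person_a = dates_list[people]
--         for j in range(people + 1, len(dates_list)):
--             person_b = dates_list[j]
--
--             # Check both month and day
--             if person_a[0] == person_b[0] and person_a[1] == person_b[1]:
--                 count += 1
--     return count
-- ===== SOURCE B (Python) =====
-- def birthday_count(dates_list):
--     """Total number of birthday pairs in a list by counting each pair only once"""
--     seen = {}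
--     count = 0
--     for d in dates_list:
--         key = (d[0], d[1])
--         c = seen.get(key, 0)
--         count += c
--         seen[key] = c + 1
--     return count
-- ===== Notes on version B (the rewrite author's own statement) =====
-- stated objective: faster
-- what changed: Replaced the O(n^2) all-pairs double loop by a single pass that keeps a hash map from (month, day) to the number of earlier occurrences and adds that count for each element.
-- outside the precondition, e.g. on birthday_count([[1], [2, 3]]): A returns 0, B raises IndexError
import Mathlib
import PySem

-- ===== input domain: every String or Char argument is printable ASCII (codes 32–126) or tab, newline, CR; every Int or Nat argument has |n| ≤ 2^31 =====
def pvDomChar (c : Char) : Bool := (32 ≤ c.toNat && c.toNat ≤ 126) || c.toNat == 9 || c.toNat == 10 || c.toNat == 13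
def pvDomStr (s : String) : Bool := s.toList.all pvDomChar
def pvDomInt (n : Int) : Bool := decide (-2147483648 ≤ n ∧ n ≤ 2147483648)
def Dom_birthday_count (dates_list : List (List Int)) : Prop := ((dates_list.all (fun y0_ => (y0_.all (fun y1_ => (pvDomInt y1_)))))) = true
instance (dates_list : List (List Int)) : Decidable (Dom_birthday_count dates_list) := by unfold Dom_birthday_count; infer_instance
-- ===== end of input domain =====

-- B replaces A's O(n^2) double loop by one pass over the list with a (month, day) -> count dictionary (faster, asymptotic).


-- ===== PORT A =====
def birthday_count (dates_list : List (List Int)) : Int :=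
  (PySem.List.pyRange 0 dates_list.length 1).foldl (fun count people =>
    let person_a := PySem.List.pyGetD dates_list people []
    (PySem.List.pyRange (people + 1) dates_list.length 1).foldl (fun count j =>
      let person_b := PySem.List.pyGetD dates_list j []
      if PySem.List.pyGetD person_a 0 0 = PySem.List.pyGetD person_b 0 0 ∧
         PySem.List.pyGetD person_a 1 0 = PySem.List.pyGetD person_b 1 0
      then count + 1 else count) count) 0

-- ===== PORT B =====
def birthday_count_alt (dates_list : List (List Int)) : Int :=
  (dates_list.foldl
    (fun (st : PySem.Dict (Int × Int) Int × Int) d =>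
      let key := (PySem.List.pyGetD d 0 0, PySem.List.pyGetD d 1 0)
      let c := st.1.getD key 0
      (st.1.insert key (c + 1), st.2 + c))
    (PySem.Dict.empty, 0)).2

-- ===== PRECONDITION & SPEC =====
-- Pre_ excludes inputs with an inner list of length < 2: on those Python A raises
-- IndexError whenever such an element is compared against another element with the
-- same leading entries (and B always raises on them); on the remaining such inputs
-- A happens to return (see cites) but B raises, so they are excluded too.
def Pre_birthday_count (dates_list : List (List Int)) : Prop :=
  ∀ d ∈ dates_list, 2 ≤ d.length
instance (dates_list : List (List Int)) : Decidable (Pre_birthday_count dates_list) := by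
  unfold Pre_birthday_count; infer_instance
def pvWitness_birthday_count : List (List Int) := [[1, 2], [3, 4], [1, 2]]
def Spec_birthday_count (dates_list : List (List Int)) (out : Int) : Prop := out = birthday_count_alt dates_list
instance (dates_list : List (List Int)) (out : Int) : Decidable (Spec_birthday_count dates_list out) := by unfold Spec_birthday_count; infer_instance

-- ===== CLAIM (what is proved, stated in full; the proofs are below) =====
def Claim_equal_birthday_count : Prop := ∀ (dates_list : List (List Int)), Dom_birthday_count dates_list → Pre_birthday_count dates_list → Spec_birthday_count dates_list (birthday_count dates_list)

-- ===== LEMMAS AND PROOFS =====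

-- the (month, day) key of one entry, as both ports read it
def pvKey (d : List Int) : Int × Int :=
  (PySem.List.pyGetD d 0 0, PySem.List.pyGetD d 1 0)

-- number of equal-key pairs, recursing on the key list
def pvPairs : List (Int × Int) → Int
  | [] => 0
  | k :: ks => (ks.count k : Int) + pvPairs ks

theorem pv_sum_shift (ks : List (Int × Int)) (f : Int × Int → Int) (k : Int × Int) :
    (ks.map (fun k' => f k' + (if k' = k then 1 else 0))).sum
      = (ks.map f).sum + (ks.count k : Int) := by
  induction ks with
  | nil => simp
  | cons x xs ih =>
    simp only [List.map_cons, List.sum_cons, List.count_cons, ih]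
    by_cases h : x = k
    · simp [h]; ring
    · have hb : (x == k) = false := by simp [h]
      simp [hb, h]; ring

theorem pv_alt_aux (l : List (List Int)) :
    ∀ (seen : PySem.Dict (Int × Int) Int) (c : Int),
    (l.foldl
      (fun (st : PySem.Dict (Int × Int) Int × Int) d =>
        let key := pvKey d
        let cc := st.1.getD key 0
        (st.1.insert key (cc + 1), st.2 + cc))
      (seen, c)).2
    = c + pvPairs (l.map pvKey) + ((l.map pvKey).map (fun k => seen.getD k 0)).sum := by
  induction l with
  | nil => simp [pvPairs]
  | cons x xs ih =>
    intro seen c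
    simp only [List.foldl_cons, List.map_cons, pvPairs, List.sum_cons]
    rw [ih]
    have hins : ∀ k' : Int × Int,
        (seen.insert (pvKey x) (seen.getD (pvKey x) 0 + 1)).getD k' 0
          = seen.getD k' 0 + (if k' = pvKey x then 1 else 0) := by
      intro k'
      rw [PySem.Dict.getD_insert]
      by_cases h : k' = pvKey x <;> simp [h]
    have hsum : ((xs.map pvKey).map
        (fun k => (seen.insert (pvKey x) (seen.getD (pvKey x) 0 + 1)).getD k 0)).sum
        = ((xs.map pvKey).map (fun k => seen.getD k 0)).sum
          + ((xs.map pvKey).count (pvKey x) : Int) := by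
      have := pv_sum_shift (xs.map pvKey) (fun k => seen.getD k 0) (pvKey x)
      simpa [hins] using this
    rw [hsum]; ring

theorem pv_map_zero_sum (l : List (List Int)) :
    ((l.map pvKey).map (fun _ => (0 : Int))).sum = 0 := by
  induction l <;> simp_all

theorem pv_alt_eq (l : List (List Int)) :
    birthday_count_alt l = pvPairs (l.map pvKey) := by
  unfold birthday_count_alt
  have h := pv_alt_aux l PySem.Dict.empty 0
  simp only [pvKey] at h
  rw [h]
  simp only [PySem.Dict.getD_empty]
  rw [pv_map_zero_sum]
  ring

theorem pv_inner (l : List (List Int)) (pa : List Int) (a : Int) (ha : 0 ≤ a) (c : Int) :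
    (PySem.List.pyRange a l.length 1).foldl
      (fun count j =>
        if PySem.List.pyGetD pa 0 0 = PySem.List.pyGetD (PySem.List.pyGetD l j []) 0 0 ∧
           PySem.List.pyGetD pa 1 0 = PySem.List.pyGetD (PySem.List.pyGetD l j []) 1 0
        then count + 1 else count) c
    = c + (((l.drop a.toNat).map pvKey).count (pvKey pa) : Int) := by
  rw [PySem.List.foldl_pyRange_pyGetD' l []
      (fun count b => if PySem.List.pyGetD pa 0 0 = PySem.List.pyGetD b 0 0 ∧
           PySem.List.pyGetD pa 1 0 = PySem.List.pyGetD b 1 0 then count + 1 else count) c ha]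
  generalize l.drop a.toNat = t
  induction t generalizing c with
  | nil => simp
  | cons x xs ih =>
    simp only [List.foldl_cons, List.map_cons, List.count_cons, ih]
    by_cases h : PySem.List.pyGetD pa 0 0 = PySem.List.pyGetD x 0 0 ∧
        PySem.List.pyGetD pa 1 0 = PySem.List.pyGetD x 1 0
    · have hk : (pvKey x == pvKey pa) = true := by
        simp [pvKey, h.1, h.2]
      simp only [if_pos h, hk]
      push_cast; ring
    · have hk : (pvKey x == pvKey pa) = false := by
        simp only [beq_eq_false_iff_ne, ne_eq, pvKey, Prod.mk.injEq, not_and]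
        intro h1 h2
        exact h ⟨h1.symm, h2.symm⟩
      simp only [if_neg h, hk]
      push_cast; ring

theorem pv_outer (l : List (List Int)) :
    ∀ (a : Int), 0 ≤ a →
    ∀ (c : Int),
    (PySem.List.pyRange a l.length 1).foldl (fun count people =>
      (PySem.List.pyRange (people + 1) l.length 1).foldl (fun count j =>
        if PySem.List.pyGetD (PySem.List.pyGetD l people []) 0 0
             = PySem.List.pyGetD (PySem.List.pyGetD l j []) 0 0 ∧
           PySem.List.pyGetD (PySem.List.pyGetD l people []) 1 0
             = PySem.List.pyGetD (PySem.List.pyGetD l j []) 1 0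
        then count + 1 else count) count) c
    = c + pvPairs ((l.drop a.toNat).map pvKey) := by
  intro a
  generalize hm : ((l.length : Int) - a).toNat = m
  induction m generalizing a with
  | zero =>
    intro ha c
    have hge : (l.length : Int) ≤ a := by omega
    rw [PySem.List.pyRange_one_eq_nil hge]
    have hd : l.length ≤ a.toNat := by omega
    simp [List.drop_eq_nil_of_le hd, pvPairs]
  | succ n ih =>
    intro ha c
    have hlt : a < (l.length : Int) := by omega
    rw [PySem.List.pyRange_one_cons hlt]
    simp only [List.foldl_cons]
    rw [pv_inner l (PySem.List.pyGetD l a []) (a + 1) (by omega) c]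
    rw [ih (a + 1) (by omega) (by omega)]
    have hlt' : a.toNat < l.length := by omega
    have hget : PySem.List.pyGetD l a [] = l[a.toNat] :=
      PySem.List.pyGetD_eq_getElem l [] ha hlt
    have ht : (a + 1).toNat = a.toNat + 1 := by omega
    have hdrop : l.drop a.toNat = l[a.toNat] :: l.drop (a.toNat + 1) :=
      List.drop_eq_getElem_cons hlt'
    rw [hget, ht, hdrop]
    simp only [List.map_cons, pvPairs]
    ring

theorem pv_a_eq (l : List (List Int)) :
    birthday_count l = pvPairs (l.map pvKey) := by
  show (PySem.List.pyRange 0 l.length 1).foldl (fun count people =>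
      (PySem.List.pyRange (people + 1) l.length 1).foldl (fun count j =>
        if PySem.List.pyGetD (PySem.List.pyGetD l people []) 0 0
             = PySem.List.pyGetD (PySem.List.pyGetD l j []) 0 0 ∧
           PySem.List.pyGetD (PySem.List.pyGetD l people []) 1 0
             = PySem.List.pyGetD (PySem.List.pyGetD l j []) 1 0
        then count + 1 else count) count) 0 = pvPairs (l.map pvKey)
  rw [pv_outer l 0 le_rfl 0]
  simp

-- ===== VERDICT (by name: the statement is the Claim_ definition above) =====
theorem birthday_count_spec : Claim_equal_birthday_count := by
  intro l _ _
  unfold Spec_birthday_count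
  rw [pv_a_eq, pv_alt_eq]
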